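-- pv_equiv track=rewrite | github.com/Ben-Wilkin/fill_or_bust | main.py | score_dice
-- ===== SOURCE A (Python) =====
-- from collections import Counter
--
-- def score_dice(dice):
--     """Score a list of dice (values 1-6).
--
--     Rules implemented:
--     - Three of a kind: face value * 100 (three 1s = 1000).
--     - Extras beyond three are NOT treated as multiplier escalation; additional dice only score separately when they are 1s or 5s.
--     - Single 1s are worth 100 each.
--     - Single 5s are worth 50 each.
--
--     Returns (score, breakdown) where breakdown is a dict of face->count used for scoring.
--     """
--     cnt = Counter(dice)
--     score = 0
--     used = Counter()
--     # Treat three-of-a-kind as exactly three dice; extras beyond three count as singles (1s and 5s)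
--     for face in range(1, 7):
--         c = cnt.get(face, 0)
--         if c >= 3:
--             base = 1000 if face == 1 else face * 100
--             score += base
--             used[face] += 3
--             cnt[face] = c - 3
--
--     # singles (only 1s and 5s score individually)
--     if cnt.get(1, 0) > 0:
--         score += cnt[1] * 100
--         used[1] += cnt[1]
--     if cnt.get(5, 0) > 0:
--         score += cnt[5] * 50
--         used[5] += cnt[5]
--
--     return score, used
-- ===== SOURCE B (Python) =====
-- from collections import Counter
--
--
-- def score_dice(dice):
--     """Score dice by sorting and scanning contiguous runs (no Counter pre-pass)."""
--     ds = sorted(dice)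
--     score = 0
--     used = Counter()
--     singles = {1: 0, 5: 0}
--     i = 0
--     while i < len(ds):
--         j = i
--         while j < len(ds) and ds[j] == ds[i]:
--             j += 1
--         face, n = ds[i], j - i
--         if 1 <= face <= 6:
--             if n >= 3:
--                 score += 1000 if face == 1 else face * 100
--                 used[face] = 3
--                 n -= 3
--             if face in singles:
--                 singles[face] = n
--         i = j
--     for face, value in ((1, 100), (5, 50)):
--         if singles[face]:
--             score += singles[face] * value
--             used[face] += singles[face]
--     return score, used
-- ===== Notes on version B (the rewrite author's own statement) =====
-- stated objective: alternative
-- what changed: B replaces A's Counter pre-pass plus fixed range(1,7) face loop by sorting the dice once and scanning contiguous runs with two index pointers, scoring each run (triple plus recorded 1/5 singles) as it is encountered.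
import Mathlib
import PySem

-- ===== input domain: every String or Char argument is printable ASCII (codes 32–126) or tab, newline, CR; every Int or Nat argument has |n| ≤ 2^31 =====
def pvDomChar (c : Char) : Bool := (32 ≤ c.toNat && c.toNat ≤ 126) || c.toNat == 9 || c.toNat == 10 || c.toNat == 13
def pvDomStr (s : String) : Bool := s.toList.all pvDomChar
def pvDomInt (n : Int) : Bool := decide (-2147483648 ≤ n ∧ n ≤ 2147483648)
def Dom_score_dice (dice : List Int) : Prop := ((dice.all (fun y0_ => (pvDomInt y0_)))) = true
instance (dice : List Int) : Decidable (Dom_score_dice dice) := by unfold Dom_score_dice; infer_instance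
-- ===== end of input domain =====

-- B replaces A's Counter pre-pass + fixed 1..6 face loop by sorting the dice and scanning
-- contiguous runs once (objective: alternative decomposition; return value only — no mutation).

-- ===== PORT A =====
def score_dice (dice : List Int) : Int × (List (Int × Int)) :=
  let cnt := PySem.Dict.counter dice
  -- for face in range(1, 7): triple pass, threading (score, used, cnt)
  let st := (PySem.List.pyRange 1 7 1).foldl
    (fun (s : Int × PySem.Dict Int Int × PySem.Dict Int Int) face =>
      let c := s.2.2.getD face 0
      if c ≥ 3 then
        let base : Int := if face == 1 then 1000 else face * 100
        (s.1 + base, s.2.1.modify face 0 (· + 3), s.2.2.insert face (c - 3))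
      else s)
    ((0 : Int), PySem.Dict.empty, cnt)
  -- singles: 1s then 5s
  let st2 := if st.2.2.getD 1 0 > 0
    then (st.1 + st.2.2.getD 1 0 * 100, st.2.1.modify 1 0 (· + st.2.2.getD 1 0))
    else (st.1, st.2.1)
  let st3 := if st.2.2.getD 5 0 > 0
    then (st2.1 + st.2.2.getD 5 0 * 50, st2.2.modify 5 0 (· + st.2.2.getD 5 0))
    else st2
  (st3.1, st3.2.items)

-- ===== PORT B =====
-- body of Source B's outer while-loop for one run (face v, run length n)
def runStep (st : Int × PySem.Dict Int Int × Int × Int) (v n : Int) :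
    Int × PySem.Dict Int Int × Int × Int :=
  if 1 ≤ v ∧ v ≤ 6 then
    let p : Int × PySem.Dict Int Int × Int :=
      if n ≥ 3 then (st.1 + (if v == 1 then 1000 else v * 100), st.2.1.insert v 3, n - 3)
      else (st.1, st.2.1, n)
    if v == 1 then (p.1, p.2.1, p.2.2, st.2.2.2)
    else if v == 5 then (p.1, p.2.1, st.2.2.1, p.2.2)
    else (p.1, p.2.1, st.2.2.1, st.2.2.2)
  else st

-- Source B's outer while-loop: advance past the current run of equal values, apply runStep
def scanRuns (s : List Int) (st : Int × PySem.Dict Int Int × Int × Int) :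
    Int × PySem.Dict Int Int × Int × Int :=
  match s with
  | [] => st
  | v :: rest =>
    scanRuns (rest.dropWhile (· == v)) (runStep st v (1 + (rest.takeWhile (· == v)).length))
termination_by s.length
decreasing_by
  simp only [List.length_cons]
  exact Nat.lt_succ_of_le (List.dropWhile_sublist _ ).length_le

def score_dice_alt (dice : List Int) : Int × (List (Int × Int)) :=
  let st := scanRuns (PySem.List.sorted dice (fun x => x) false) ((0 : Int), PySem.Dict.empty, 0, 0)
  -- for face, value in ((1, 100), (5, 50)): add the recorded singles
  let q := if st.2.2.1 ≠ 0 then (st.1 + st.2.2.1 * 100, st.2.1.modify 1 0 (· + st.2.2.1)) else (st.1, st.2.1)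
  let r := if st.2.2.2 ≠ 0 then (q.1 + st.2.2.2 * 50, q.2.modify 5 0 (· + st.2.2.2)) else q
  (r.1, r.2.items)

-- ===== PRECONDITION & SPEC =====
def Spec_score_dice (dice : List Int) (out : Int × (List (Int × Int))) : Prop := out = score_dice_alt dice
instance (dice : List Int) (out : Int × (List (Int × Int))) : Decidable (Spec_score_dice dice out) := by unfold Spec_score_dice; infer_instance

-- ===== CLAIM (what is proved, stated in full; the proofs are below) =====
def Claim_equal_score_dice : Prop := ∀ (dice : List Int), Dom_score_dice dice → Spec_score_dice dice (score_dice dice)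

-- ===== LEMMAS AND PROOFS =====

lemma runStep_out (st : Int × PySem.Dict Int Int × Int × Int) (v n : Int)
    (h : ¬(1 ≤ v ∧ v ≤ 6)) : runStep st v n = st := by
  simp [runStep, h]

lemma drop_gt (v : Int) (l : List Int) (hp : l.Pairwise (· ≤ ·)) (hge : ∀ y ∈ l, v ≤ y) :
    ∀ x ∈ l.dropWhile (· == v), v < x := by
  induction l with
  | nil => simp
  | cons a t iht =>
    intro x hx
    by_cases ha : a = v
    · rw [List.dropWhile_cons_of_pos (by simp [ha])] at hx
      exact iht hp.tail (fun y hy => hge y (List.mem_cons_of_mem _ hy)) x hx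
    · rw [List.dropWhile_cons_of_neg (by simp [ha])] at hx
      have hva : v < a := lt_of_le_of_ne (hge a (List.mem_cons_self)) (Ne.symm ha)
      rcases List.mem_cons.1 hx with rfl | hxt
      · exact hva
      · exact lt_of_lt_of_le hva ((List.pairwise_cons.1 hp).1 x hxt)

lemma scan_sorted (s : List Int) (st : Int × PySem.Dict Int Int × Int × Int) :
    s.Pairwise (· ≤ ·) → scanRuns s st = [1,2,3,4,5,6].foldl
      (fun t f => if s.count f = 0 then t else runStep t f (s.count f : Int)) st := by
  induction s, st using scanRuns.induct with
  | case1 st => intro _; simp [scanRuns]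
  | case2 st v rest ih =>
      intro hs
      have hvr : ∀ x ∈ rest, v ≤ x := (List.pairwise_cons.1 hs).1
      have hrs : rest.Pairwise (· ≤ ·) := (List.pairwise_cons.1 hs).2
      have htailp : (rest.dropWhile (· == v)).Pairwise (· ≤ ·) :=
        List.Pairwise.sublist (List.dropWhile_sublist _) hrs
      have hgt : ∀ x ∈ rest.dropWhile (· == v), v < x := drop_gt v rest hrs hvr
      have hct0 : (rest.dropWhile (· == v)).count v = 0 :=
        List.count_eq_zero.2 (fun hm => lt_irrefl v (hgt v hm))
      have htw : (rest.takeWhile (· == v)).count v = (rest.takeWhile (· == v)).length := by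
        rw [List.count_eq_length]
        intro b hb
        exact (show b = v by simpa using List.mem_takeWhile_imp hb).symm
      have hsplit : rest.count v = (rest.takeWhile (· == v)).length := by
        conv_lhs => rw [← List.takeWhile_append_dropWhile (p := (· == v)) (l := rest)]
        rw [List.count_append, htw, hct0]; omega
      have hcv : (v :: rest).count v = 1 + (rest.takeWhile (· == v)).length := by
        rw [List.count_cons_self, hsplit]; omega
      have hcne : ∀ f, f ≠ v → (v :: rest).count f = (rest.dropWhile (· == v)).count f := by
        intro f hf
        rw [List.count_cons_of_ne (Ne.symm hf)]
        conv_lhs => rw [← List.takeWhile_append_dropWhile (p := (· == v)) (l := rest)]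
        rw [List.count_append]
        have : (rest.takeWhile (· == v)).count f = 0 := by
          refine List.count_eq_zero.2 (fun hm => ?_)
          have := List.mem_takeWhile_imp hm
          simp at this; exact absurd this hf
        omega
      have hmem_ge : ∀ f, (v :: rest).count f ≠ 0 → v ≤ f := by
        intro f hc
        have hmem : f ∈ v :: rest := List.count_pos_iff.1 (Nat.pos_of_ne_zero hc)
        rcases List.mem_cons.1 hmem with rfl | h
        · exact le_refl _
        · exact hvr f h
      by_cases hv6 : 1 ≤ v ∧ v ≤ 6
      · obtain ⟨hb1, hb2⟩ := hv6
        have hn : (1 : Int) + ((rest.takeWhile (· == v)).length : Int)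
            = (((v :: rest).count v : Nat) : Int) := by rw [hcv]; push_cast; ring
        have hz : ∀ f, f < v → (v :: rest).count f = 0 := by
          intro f hf; by_contra hc; exact absurd (hmem_ge f hc) (by omega)
        have hzt : ∀ f, f ≤ v → (rest.dropWhile (· == v)).count f = 0 := by
          intro f hf; refine List.count_eq_zero.2 (fun hm => ?_)
          exact absurd (hgt f hm) (by omega)
        have hne : ∀ f, v < f → (v :: rest).count f = (rest.dropWhile (· == v)).count f := by
          intro f hf; exact hcne f (by omega)
        rw [scanRuns, ih htailp, hn]
        interval_cases v <;> simp only [List.foldl] <;> simp [hz, hzt, hne]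
      · rw [scanRuns, ih htailp, runStep_out st v _ hv6]
        simp only [List.foldl]
        rw [hcne 1 (by omega), hcne 2 (by omega), hcne 3 (by omega),
            hcne 4 (by omega), hcne 5 (by omega), hcne 6 (by omega)]

def remD (dice : List Int) (f : Int) : Int :=
  if ((dice.count f : Int)) ≥ 3 then (dice.count f : Int) - 3 else (dice.count f : Int)

lemma loop_sim (dice : List Int) (faces : List Int) (hnd : faces.Nodup)
    (hr : ∀ f ∈ faces, 1 ≤ f ∧ f ≤ 6)
    (sc : Int) (us cnt : PySem.Dict Int Int) (s1 s5 : Int)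
    (hc : ∀ f ∈ faces, cnt.getD f 0 = (dice.count f : Int))
    (hu : ∀ f ∈ faces, us.getD f 0 = 0)
    (h1 : (1 : Int) ∈ faces → s1 = 0) (h5 : (5 : Int) ∈ faces → s5 = 0) :
    (faces.foldl (fun (s : Int × PySem.Dict Int Int × PySem.Dict Int Int) face =>
        if s.2.2.getD face 0 ≥ 3 then
          (s.1 + (if (face == 1) = true then 1000 else face * 100),
            s.2.1.modify face 0 (fun x => x + 3),
            s.2.2.insert face (s.2.2.getD face 0 - 3))
        else s) (sc, us, cnt)).1
      = (faces.foldl (fun t f => if dice.count f = 0 then t else runStep t f (dice.count f : Int))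
          (sc, us, s1, s5)).1
    ∧ (faces.foldl (fun (s : Int × PySem.Dict Int Int × PySem.Dict Int Int) face =>
        if s.2.2.getD face 0 ≥ 3 then
          (s.1 + (if (face == 1) = true then 1000 else face * 100),
            s.2.1.modify face 0 (fun x => x + 3),
            s.2.2.insert face (s.2.2.getD face 0 - 3))
        else s) (sc, us, cnt)).2.1
      = (faces.foldl (fun t f => if dice.count f = 0 then t else runStep t f (dice.count f : Int))
          (sc, us, s1, s5)).2.1
    ∧ (∀ g : Int, (faces.foldl (fun (s : Int × PySem.Dict Int Int × PySem.Dict Int Int) face =>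
        if s.2.2.getD face 0 ≥ 3 then
          (s.1 + (if (face == 1) = true then 1000 else face * 100),
            s.2.1.modify face 0 (fun x => x + 3),
            s.2.2.insert face (s.2.2.getD face 0 - 3))
        else s) (sc, us, cnt)).2.2.getD g 0
      = if g ∈ faces then remD dice g else cnt.getD g 0)
    ∧ (faces.foldl (fun t f => if dice.count f = 0 then t else runStep t f (dice.count f : Int))
          (sc, us, s1, s5)).2.2.1 = (if (1:Int) ∈ faces then remD dice 1 else s1)
    ∧ (faces.foldl (fun t f => if dice.count f = 0 then t else runStep t f (dice.count f : Int))
          (sc, us, s1, s5)).2.2.2 = (if (5:Int) ∈ faces then remD dice 5 else s5) := by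
  induction faces generalizing sc us cnt s1 s5 with
  | nil => simp
  | cons f rest ih =>
    have hfr : f ∉ rest := (List.nodup_cons.1 hnd).1
    have hndr : rest.Nodup := (List.nodup_cons.1 hnd).2
    have hf16 : 1 ≤ f ∧ f ≤ 6 := hr f List.mem_cons_self
    have hcf : cnt.getD f 0 = (dice.count f : Int) := hc f List.mem_cons_self
    have huf : us.getD f 0 = 0 := hu f List.mem_cons_self
    simp only [List.foldl_cons]
    have hmr : ∀ g ∈ rest, g ∈ f :: rest := fun g hg => List.mem_cons_of_mem _ hg
    by_cases hz : dice.count f = 0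
    · have hA : ¬ (cnt.getD f 0 ≥ 3) := by rw [hcf, hz]; norm_num
      rw [if_neg hA, if_pos hz]
      obtain ⟨e1, e2, e3, e4, e5⟩ := ih hndr (fun g hg => hr g (hmr g hg)) sc us cnt s1 s5
        (fun g hg => hc g (hmr g hg)) (fun g hg => hu g (hmr g hg))
        (fun h => h1 (hmr 1 h)) (fun h => h5 (hmr 5 h))
      have hremz : remD dice f = 0 := by simp [remD, hz]
      refine ⟨e1, e2, fun g => ?_, ?_, ?_⟩
      · rw [e3 g]
        by_cases hg : g ∈ rest
        · simp [hg]
        · by_cases hgf : g = f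
          · subst hgf; simp [hg, hremz, hcf, hz]
          · simp [hg, hgf]
      · rw [e4]
        by_cases hg : (1:Int) ∈ rest
        · simp [hg]
        · by_cases hgf : (1:Int) = f
          · subst hgf; simp [hg, hremz, h1 List.mem_cons_self]
          · simp [hg, hgf]
      · rw [e5]
        by_cases hg : (5:Int) ∈ rest
        · simp [hg]
        · by_cases hgf : (5:Int) = f
          · subst hgf; simp [hg, hremz, h5 List.mem_cons_self]
          · simp [hg, hgf]
    · rw [if_neg hz]
      have husf : us.modify f 0 (fun x => x + 3) = us.insert f 3 := by
        simp [PySem.Dict.modify, huf]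
      by_cases hc3 : cnt.getD f 0 ≥ 3
      · rw [if_pos hc3]
        have hn3 : ((dice.count f : Int)) ≥ 3 := hcf ▸ hc3
        have hrem : remD dice f = (dice.count f : Int) - 3 := by simp [remD, hn3]
        have hstep : runStep (sc, us, s1, s5) f (dice.count f : Int) =
            (sc + (if (f == 1) = true then 1000 else f * 100), us.insert f 3,
              (if f = 1 then (dice.count f : Int) - 3 else s1),
              (if f = 5 then (dice.count f : Int) - 3 else s5)) := by
          by_cases hf1 : f = 1
          · subst hf1; simp [runStep, hn3]
          · by_cases hf5 : f = 5
            · subst hf5; simp [runStep, hn3]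
            · simp [runStep, hf16, hn3, hf1, hf5]
        rw [hstep, hcf, husf]
        obtain ⟨e1, e2, e3, e4, e5⟩ := ih hndr (fun g hg => hr g (hmr g hg))
          (sc + (if (f == 1) = true then 1000 else f * 100)) (us.insert f 3)
          (cnt.insert f ((dice.count f : Int) - 3))
          (if f = 1 then (dice.count f : Int) - 3 else s1)
          (if f = 5 then (dice.count f : Int) - 3 else s5)
          (fun g hg => by
            rw [PySem.Dict.getD_insert, if_neg (by rintro rfl; exact hfr hg)]
            exact hc g (hmr g hg))
          (fun g hg => by
            rw [PySem.Dict.getD_insert, if_neg (by rintro rfl; exact hfr hg)]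
            exact hu g (hmr g hg))
          (fun h => by rw [if_neg (by rintro rfl; exact hfr h)]; exact h1 (hmr 1 h))
          (fun h => by rw [if_neg (by rintro rfl; exact hfr h)]; exact h5 (hmr 5 h))
        refine ⟨e1, e2, fun g => ?_, ?_, ?_⟩
        · rw [e3 g]
          by_cases hg : g ∈ rest
          · simp [hg]
          · by_cases hgf : g = f
            · subst hgf
              simp [hg, hrem]
            · simp [hg, hgf, PySem.Dict.getD_insert]
        · rw [e4]
          by_cases hg : (1:Int) ∈ rest
          · simp [hg]
          · by_cases hgf : (1:Int) = f
            · subst hgf; simp [hg, hrem]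
            · simp [hg, hgf, Ne.symm hgf]
        · rw [e5]
          by_cases hg : (5:Int) ∈ rest
          · simp [hg]
          · by_cases hgf : (5:Int) = f
            · subst hgf; simp [hg, hrem]
            · simp [hg, hgf, Ne.symm hgf]
      · rw [if_neg hc3]
        have hn3 : ¬ ((dice.count f : Int) ≥ 3) := hcf ▸ hc3
        have hrem : remD dice f = (dice.count f : Int) := by simp [remD, hn3]
        have hstep : runStep (sc, us, s1, s5) f (dice.count f : Int) =
            (sc, us,
              (if f = 1 then (dice.count f : Int) else s1),
              (if f = 5 then (dice.count f : Int) else s5)) := by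
          by_cases hf1 : f = 1
          · subst hf1; simp [runStep, hn3]
          · by_cases hf5 : f = 5
            · subst hf5; simp [runStep, hn3]
            · simp [runStep, hf16, hn3, hf1, hf5]
        rw [hstep]
        obtain ⟨e1, e2, e3, e4, e5⟩ := ih hndr (fun g hg => hr g (hmr g hg)) sc us cnt
          (if f = 1 then (dice.count f : Int) else s1)
          (if f = 5 then (dice.count f : Int) else s5)
          (fun g hg => hc g (hmr g hg)) (fun g hg => hu g (hmr g hg))
          (fun h => by rw [if_neg (by rintro rfl; exact hfr h)]; exact h1 (hmr 1 h))
          (fun h => by rw [if_neg (by rintro rfl; exact hfr h)]; exact h5 (hmr 5 h))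
        refine ⟨e1, e2, fun g => ?_, ?_, ?_⟩
        · rw [e3 g]
          by_cases hg : g ∈ rest
          · simp [hg]
          · by_cases hgf : g = f
            · subst hgf; simp [hg, hrem, hcf]
            · simp [hg, hgf]
        · rw [e4]
          by_cases hg : (1:Int) ∈ rest
          · simp [hg]
          · by_cases hgf : (1:Int) = f
            · subst hgf; simp [hg, hrem]
            · simp [hg, hgf, Ne.symm hgf]
        · rw [e5]
          by_cases hg : (5:Int) ∈ rest
          · simp [hg]
          · by_cases hgf : (5:Int) = f
            · subst hgf; simp [hg, hrem]
            · simp [hg, hgf, Ne.symm hgf]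

theorem score_eq (dice : List Int) : score_dice dice = score_dice_alt dice := by
  unfold score_dice score_dice_alt
  rw [scan_sorted _ _ (by simpa using PySem.List.sorted_pairwise (xs := dice) (key := fun x => x))]
  have hcnt : ∀ f : Int, (PySem.List.sorted dice (fun x => x) false).count f = dice.count f :=
    fun f => (PySem.List.sorted_perm _ _ _).count_eq f
  simp only [hcnt]
  rw [show PySem.List.pyRange 1 7 1 = [1,2,3,4,5,6] from rfl]
  obtain ⟨e1, e2, e3, e4, e5⟩ := loop_sim dice [1,2,3,4,5,6] (by decide) (by decide)
    0 PySem.Dict.empty (PySem.Dict.counter dice) 0 0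
    (fun f _ => PySem.Dict.getD_counter dice f)
    (fun f _ => by simp)
    (fun _ => rfl) (fun _ => rfl)
  have hpos1 : (remD dice 1 > 0) ↔ (remD dice 1 ≠ 0) := by unfold remD; split_ifs <;> omega
  have hpos5 : (remD dice 5 > 0) ↔ (remD dice 5 ≠ 0) := by unfold remD; split_ifs <;> omega
  have m1 : (1:Int) ∈ ([1,2,3,4,5,6] : List Int) := by decide
  have m5 : (5:Int) ∈ ([1,2,3,4,5,6] : List Int) := by decide
  simp only [e1, e2, e3, e4, e5, m1, m5, if_true, hpos1, hpos5]

-- ===== VERDICT (by name: the statement is the Claim_ definition above) =====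
theorem score_dice_spec : Claim_equal_score_dice := by
  intro dice _
  unfold Spec_score_dice
  exact score_eq dice
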